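-- pv_equiv track=rewrite | github.com/aykevl/ufloat8 | ufloat8.py | ufloat8_enc
-- ===== SOURCE A (Python) =====
-- def ufloat8_enc(value):
--     # Initial value:
--     #   exponent = 0
--     #   mantissa = capped value
--     fl = value & 0x0f;
--
--     # The magic value 16 was determined by trial-and-error...
--     for i in range(1, 16):
--         # Chop off precision bits on the right side each iteration. For
--         # exponent=0 this was done in the initialisation above.
--         value >>= 1
--         # Check whether the left most bit of the resulting mantissa is set. If
--         # so, update the resulting float.
--         if value & 0x08:
--             # there are bits found!
--             fl = value & 0x0f
--             fl |= i << 4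
--
--     return fl
-- ===== SOURCE B (Python) =====
-- def ufloat8_enc(value):
--     # Closed form: exponent = position of the highest set bit in the
--     # window of bits 4..18, instead of a 15-iteration scan.
--     m = value & 0x7FFF0
--     if m == 0:
--         return value & 0x0f
--     exp = m.bit_length() - 4
--     return ((value >> exp) & 0x0f) | (exp << 4)
-- ===== Notes on version B (the rewrite author's own statement) =====
-- stated objective: simpler
-- what changed: Replaced the fixed-length shift-and-test loop with a closed-form computation: mask the value to the encodable bit window and derive the exponent directly from the masked value's bit_length.
import Mathlib
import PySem

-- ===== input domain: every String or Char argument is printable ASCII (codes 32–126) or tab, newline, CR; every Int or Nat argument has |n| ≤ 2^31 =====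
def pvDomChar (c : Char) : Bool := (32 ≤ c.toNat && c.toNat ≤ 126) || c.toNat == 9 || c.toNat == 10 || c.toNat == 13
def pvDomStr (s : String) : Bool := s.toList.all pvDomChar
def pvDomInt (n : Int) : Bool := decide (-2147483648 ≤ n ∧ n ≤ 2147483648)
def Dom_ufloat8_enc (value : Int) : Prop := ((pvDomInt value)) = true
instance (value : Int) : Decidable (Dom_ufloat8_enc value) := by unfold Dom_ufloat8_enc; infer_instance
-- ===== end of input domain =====

-- B replaces A's fixed-length scan with a closed-form highest-set-bit computation
-- (mask the encodable bit window, exponent from bit_length); objective: simpler.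

-- ===== PORT A =====
def ufloat8_enc (value : Int) : Int :=
  let fl := PySem.Int.band value 0x0f
  let s := (PySem.List.pyRange 1 16 1).foldl
    (fun (s : Int × Int) (i : Int) =>
      let value := s.1 >>> (1 : Nat)
      if PySem.Int.band value 0x08 ≠ 0 then
        (value, PySem.Int.bor (PySem.Int.band value 0x0f) (i <<< (4 : Nat)))
      else (value, s.2))
    (value, fl)
  s.2


-- ===== PORT B =====
def ufloat8_enc_alt (value : Int) : Int :=
  let m := PySem.Int.band value 0x7FFF0
  if m = 0 then PySem.Int.band value 0x0f
  else
    let exp : Int := (PySem.Int.bitLength m : Int) - 4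
    PySem.Int.bor (PySem.Int.band (value >>> exp.toNat) 0x0f) (exp <<< (4 : Nat))




-- ===== PRECONDITION & SPEC =====
def Spec_ufloat8_enc (value : Int) (out : Int) : Prop := out = ufloat8_enc_alt value
instance (value : Int) (out : Int) : Decidable (Spec_ufloat8_enc value out) := by
  unfold Spec_ufloat8_enc; infer_instance

-- ===== CLAIM (what is proved, stated in full; the proofs are below) =====
def Claim_equal_ufloat8_enc : Prop := ∀ (value : Int), Dom_ufloat8_enc value → Spec_ufloat8_enc value (ufloat8_enc value)

-- ===== LEMMAS AND PROOFS =====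
theorem natAnd15 (n : Nat) : n &&& 15 = n % 16 := by
  have := Nat.and_two_pow_sub_one_eq_mod n 4
  norm_num at this; omega

theorem natAnd8 (n : Nat) : n &&& 8 = n / 8 % 2 * 8 := by
  have h := Nat.and_two_pow n 3
  rw [Nat.testBit_eq_decide_div_mod_eq] at h
  norm_num at h
  by_cases hc : n / 8 % 2 = 1 <;> simp [hc] at h ⊢ <;> omega

theorem natAndM (n : Nat) : n &&& 524272 = n / 16 % 32768 * 16 := by
  have key : n &&& 2 ^ 4 * (2 ^ 15 - 1) = 2 ^ 4 * (n / 2 ^ 4 % 2 ^ 15) := by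
    apply Nat.eq_of_testBit_eq
    intro i
    simp only [Nat.testBit_and, Nat.testBit_two_pow_mul, Nat.testBit_two_pow_sub_one,
      Nat.testBit_mod_two_pow, Nat.testBit_div_two_pow]
    by_cases h4 : 4 ≤ i <;> by_cases h19 : i - 4 < 15 <;> simp [h4, h19]
  norm_num at key
  omega


theorem band15 (a : Int) : PySem.Int.band a 15 = a % 16 := by
  unfold PySem.Int.band
  split_ifs with h1 h2 h2
  · rw [show ((15:Int).toNat) = 15 from rfl, natAnd15]; omega
  · omega
  · rw [show ((15:Int).toNat) = 15 from rfl, Nat.and_comm, natAnd15]; omega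
  · omega

theorem band8 (a : Int) : PySem.Int.band a 8 = a % 16 - a % 8 := by
  unfold PySem.Int.band
  split_ifs with h1 h2 h2
  · rw [show ((8:Int).toNat) = 8 from rfl, natAnd8]; omega
  · omega
  · rw [show ((8:Int).toNat) = 8 from rfl, Nat.and_comm, natAnd8]; omega
  · omega

theorem band524272 (a : Int) : PySem.Int.band a 524272 = a % 524288 - a % 16 := by
  unfold PySem.Int.band
  split_ifs with h1 h2 h2
  · rw [show ((524272:Int).toNat) = 524272 from rfl, natAndM]; omega
  · omega
  · rw [show ((524272:Int).toNat) = 524272 from rfl, Nat.and_comm, natAndM]; omega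
  · omega


def stepA : (Int × Int) → Int → (Int × Int) := fun s i =>
  let value := s.1 >>> (1 : Nat)
  if PySem.Int.band value 0x08 ≠ 0 then
    (value, PySem.Int.bor (PySem.Int.band value 0x0f) (i <<< (4 : Nat)))
  else (value, s.2)

theorem stepA_pair (v fl i : Int) : stepA (v, fl) i =
    (v >>> (1:Nat), if PySem.Int.band (v >>> (1:Nat)) 8 ≠ 0 then
      PySem.Int.bor (PySem.Int.band (v >>> (1:Nat)) 15) (i <<< (4:Nat)) else fl) := by
  unfold stepA
  by_cases h : PySem.Int.band (v >>> (1:Nat)) 8 ≠ 0 <;> simp [h]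

theorem fstA (l : List Int) : ∀ (v fl : Int),
    (l.foldl stepA (v, fl)).1 = v / 2 ^ l.length := by
  induction l with
  | nil => intro v fl; simp
  | cons i l ih =>
    intro v fl
    rw [List.foldl_cons, stepA_pair]
    rcases h : (if PySem.Int.band (v >>> (1:Nat)) 8 ≠ 0 then
      PySem.Int.bor (PySem.Int.band (v >>> (1:Nat)) 15) (i <<< (4:Nat)) else fl) with X
    rw [ih]
    rw [Int.shiftRight_eq_div_pow]
    simp only [List.length_cons]
    rw [show ((2^1 : Nat) : Int) = 2 from rfl]
    rw [Int.ediv_ediv_of_nonneg (by norm_num)]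
    ring_nf

theorem sndA (l : List Int) (i v fl : Int) :
    ((l ++ [i]).foldl stepA (v, fl)).2
      = if PySem.Int.band (v / 2 ^ (l.length + 1)) 8 ≠ 0
        then PySem.Int.bor (PySem.Int.band (v / 2 ^ (l.length + 1)) 15) (i <<< (4:Nat))
        else (l.foldl stepA (v, fl)).2 := by
  rw [List.foldl_append, List.foldl_cons, List.foldl_nil]
  rcases hs : l.foldl stepA (v, fl) with ⟨a, b⟩
  have ha : a = v / 2 ^ l.length := by rw [← fstA l v fl, hs]
  rw [stepA_pair]
  simp only [ha, Int.shiftRight_eq_div_pow, show ((2^1 : Nat) : Int) = 2 from rfl]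
  rw [Int.ediv_ediv_of_nonneg (by norm_num), ← pow_succ]



set_option maxHeartbeats 2000000 in
theorem mainEq (value : Int) : ufloat8_enc value = ufloat8_enc_alt value := by
  have hA : ufloat8_enc value = (([1,2,3,4,5,6,7,8,9,10,11,12,13,14,15] : List Int).foldl stepA (value, PySem.Int.band value 15)).2 := by
    unfold ufloat8_enc
    rw [show PySem.List.pyRange 1 16 1 = [1,2,3,4,5,6,7,8,9,10,11,12,13,14,15] from by decide]
    rfl
  rw [hA]
  rw [show ([1,2,3,4,5,6,7,8,9,10,11,12,13,14,15]:List Int) = [1,2,3,4,5,6,7,8,9,10,11,12,13,14] ++ [15] from rfl, sndA,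
    show (([1,2,3,4,5,6,7,8,9,10,11,12,13,14]:List Int)).length + 1 = 15 from by simp]
  rw [show ([1,2,3,4,5,6,7,8,9,10,11,12,13,14]:List Int) = [1,2,3,4,5,6,7,8,9,10,11,12,13] ++ [14] from rfl, sndA,
    show (([1,2,3,4,5,6,7,8,9,10,11,12,13]:List Int)).length + 1 = 14 from by simp]
  rw [show ([1,2,3,4,5,6,7,8,9,10,11,12,13]:List Int) = [1,2,3,4,5,6,7,8,9,10,11,12] ++ [13] from rfl, sndA,
    show (([1,2,3,4,5,6,7,8,9,10,11,12]:List Int)).length + 1 = 13 from by simp]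
  rw [show ([1,2,3,4,5,6,7,8,9,10,11,12]:List Int) = [1,2,3,4,5,6,7,8,9,10,11] ++ [12] from rfl, sndA,
    show (([1,2,3,4,5,6,7,8,9,10,11]:List Int)).length + 1 = 12 from by simp]
  rw [show ([1,2,3,4,5,6,7,8,9,10,11]:List Int) = [1,2,3,4,5,6,7,8,9,10] ++ [11] from rfl, sndA,
    show (([1,2,3,4,5,6,7,8,9,10]:List Int)).length + 1 = 11 from by simp]
  rw [show ([1,2,3,4,5,6,7,8,9,10]:List Int) = [1,2,3,4,5,6,7,8,9] ++ [10] from rfl, sndA,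
    show (([1,2,3,4,5,6,7,8,9]:List Int)).length + 1 = 10 from by simp]
  rw [show ([1,2,3,4,5,6,7,8,9]:List Int) = [1,2,3,4,5,6,7,8] ++ [9] from rfl, sndA,
    show (([1,2,3,4,5,6,7,8]:List Int)).length + 1 = 9 from by simp]
  rw [show ([1,2,3,4,5,6,7,8]:List Int) = [1,2,3,4,5,6,7] ++ [8] from rfl, sndA,
    show (([1,2,3,4,5,6,7]:List Int)).length + 1 = 8 from by simp]
  rw [show ([1,2,3,4,5,6,7]:List Int) = [1,2,3,4,5,6] ++ [7] from rfl, sndA,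
    show (([1,2,3,4,5,6]:List Int)).length + 1 = 7 from by simp]
  rw [show ([1,2,3,4,5,6]:List Int) = [1,2,3,4,5] ++ [6] from rfl, sndA,
    show (([1,2,3,4,5]:List Int)).length + 1 = 6 from by simp]
  rw [show ([1,2,3,4,5]:List Int) = [1,2,3,4] ++ [5] from rfl, sndA,
    show (([1,2,3,4]:List Int)).length + 1 = 5 from by simp]
  rw [show ([1,2,3,4]:List Int) = [1,2,3] ++ [4] from rfl, sndA,
    show (([1,2,3]:List Int)).length + 1 = 4 from by simp]
  rw [show ([1,2,3]:List Int) = [1,2] ++ [3] from rfl, sndA,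
    show (([1,2]:List Int)).length + 1 = 3 from by simp]
  rw [show ([1,2]:List Int) = [1] ++ [2] from rfl, sndA,
    show (([1]:List Int)).length + 1 = 2 from by simp]
  rw [show ([1]:List Int) = [] ++ [1] from rfl, sndA,
    show (([]:List Int)).length + 1 = 1 from by simp]
  simp only [List.foldl_nil]
  unfold ufloat8_enc_alt
  simp only [band15, band8, band524272, Int.shiftRight_eq_div_pow, Int.shiftLeft_eq]
  by_cases hm : value % 524288 - value % 16 = 0
  · rw [if_pos hm,
      if_neg (show ¬(value / 2 ^ 15 % 16 - value / 2 ^ 15 % 8 ≠ 0) from by omega),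
      if_neg (show ¬(value / 2 ^ 14 % 16 - value / 2 ^ 14 % 8 ≠ 0) from by omega),
      if_neg (show ¬(value / 2 ^ 13 % 16 - value / 2 ^ 13 % 8 ≠ 0) from by omega),
      if_neg (show ¬(value / 2 ^ 12 % 16 - value / 2 ^ 12 % 8 ≠ 0) from by omega),
      if_neg (show ¬(value / 2 ^ 11 % 16 - value / 2 ^ 11 % 8 ≠ 0) from by omega),
      if_neg (show ¬(value / 2 ^ 10 % 16 - value / 2 ^ 10 % 8 ≠ 0) from by omega),
      if_neg (show ¬(value / 2 ^ 9 % 16 - value / 2 ^ 9 % 8 ≠ 0) from by omega),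
      if_neg (show ¬(value / 2 ^ 8 % 16 - value / 2 ^ 8 % 8 ≠ 0) from by omega),
      if_neg (show ¬(value / 2 ^ 7 % 16 - value / 2 ^ 7 % 8 ≠ 0) from by omega),
      if_neg (show ¬(value / 2 ^ 6 % 16 - value / 2 ^ 6 % 8 ≠ 0) from by omega),
      if_neg (show ¬(value / 2 ^ 5 % 16 - value / 2 ^ 5 % 8 ≠ 0) from by omega),
      if_neg (show ¬(value / 2 ^ 4 % 16 - value / 2 ^ 4 % 8 ≠ 0) from by omega),
      if_neg (show ¬(value / 2 ^ 3 % 16 - value / 2 ^ 3 % 8 ≠ 0) from by omega),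
      if_neg (show ¬(value / 2 ^ 2 % 16 - value / 2 ^ 2 % 8 ≠ 0) from by omega),
      if_neg (show ¬(value / 2 ^ 1 % 16 - value / 2 ^ 1 % 8 ≠ 0) from by omega)]
  · rw [if_neg hm]
    have hL1 := PySem.Int.two_pow_bitLength_le (value % 524288 - value % 16) (by omega)
    have hL2 := PySem.Int.lt_two_pow_bitLength (value % 524288 - value % 16)
    generalize hLg : PySem.Int.bitLength (value % 524288 - value % 16) = L at hL1 hL2 ⊢
    have hmge : 16 ≤ value % 524288 - value % 16 := by omega
    have hL5 : 5 ≤ L := by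
      by_contra h
      have : (2:Nat) ^ L ≤ 2 ^ 4 := Nat.pow_le_pow_right (by norm_num) (by omega)
      omega
    have hL19 : L ≤ 19 := by
      by_contra h
      have : (2:Nat) ^ 19 ≤ 2 ^ (L-1) := Nat.pow_le_pow_right (by norm_num) (by omega)
      omega
    have hT : ((L:Int) - 4).toNat = L - 4 := by omega
    rw [hT]
    rcases (show L = 5 ∨ L = 6 ∨ L = 7 ∨ L = 8 ∨ L = 9 ∨ L = 10 ∨ L = 11 ∨ L = 12 ∨ L = 13 ∨ L = 14 ∨ L = 15 ∨ L = 16 ∨ L = 17 ∨ L = 18 ∨ L = 19 from by omega) with h|h|h|h|h|h|h|h|h|h|h|h|h|h|h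
    · subst h
      norm_num at hL1 hL2
      rw [if_neg (show ¬(value / 2 ^ 15 % 16 - value / 2 ^ 15 % 8 ≠ 0) from by omega),
        if_neg (show ¬(value / 2 ^ 14 % 16 - value / 2 ^ 14 % 8 ≠ 0) from by omega),
        if_neg (show ¬(value / 2 ^ 13 % 16 - value / 2 ^ 13 % 8 ≠ 0) from by omega),
        if_neg (show ¬(value / 2 ^ 12 % 16 - value / 2 ^ 12 % 8 ≠ 0) from by omega),
        if_neg (show ¬(value / 2 ^ 11 % 16 - value / 2 ^ 11 % 8 ≠ 0) from by omega),
        if_neg (show ¬(value / 2 ^ 10 % 16 - value / 2 ^ 10 % 8 ≠ 0) from by omega),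
        if_neg (show ¬(value / 2 ^ 9 % 16 - value / 2 ^ 9 % 8 ≠ 0) from by omega),
        if_neg (show ¬(value / 2 ^ 8 % 16 - value / 2 ^ 8 % 8 ≠ 0) from by omega),
        if_neg (show ¬(value / 2 ^ 7 % 16 - value / 2 ^ 7 % 8 ≠ 0) from by omega),
        if_neg (show ¬(value / 2 ^ 6 % 16 - value / 2 ^ 6 % 8 ≠ 0) from by omega),
        if_neg (show ¬(value / 2 ^ 5 % 16 - value / 2 ^ 5 % 8 ≠ 0) from by omega),
        if_neg (show ¬(value / 2 ^ 4 % 16 - value / 2 ^ 4 % 8 ≠ 0) from by omega),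
        if_neg (show ¬(value / 2 ^ 3 % 16 - value / 2 ^ 3 % 8 ≠ 0) from by omega),
        if_neg (show ¬(value / 2 ^ 2 % 16 - value / 2 ^ 2 % 8 ≠ 0) from by omega),
        if_pos (show value / 2 ^ 1 % 16 - value / 2 ^ 1 % 8 ≠ 0 from by omega)]
      norm_num
    · subst h
      norm_num at hL1 hL2
      rw [if_neg (show ¬(value / 2 ^ 15 % 16 - value / 2 ^ 15 % 8 ≠ 0) from by omega),
        if_neg (show ¬(value / 2 ^ 14 % 16 - value / 2 ^ 14 % 8 ≠ 0) from by omega),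
        if_neg (show ¬(value / 2 ^ 13 % 16 - value / 2 ^ 13 % 8 ≠ 0) from by omega),
        if_neg (show ¬(value / 2 ^ 12 % 16 - value / 2 ^ 12 % 8 ≠ 0) from by omega),
        if_neg (show ¬(value / 2 ^ 11 % 16 - value / 2 ^ 11 % 8 ≠ 0) from by omega),
        if_neg (show ¬(value / 2 ^ 10 % 16 - value / 2 ^ 10 % 8 ≠ 0) from by omega),
        if_neg (show ¬(value / 2 ^ 9 % 16 - value / 2 ^ 9 % 8 ≠ 0) from by omega),
        if_neg (show ¬(value / 2 ^ 8 % 16 - value / 2 ^ 8 % 8 ≠ 0) from by omega),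
        if_neg (show ¬(value / 2 ^ 7 % 16 - value / 2 ^ 7 % 8 ≠ 0) from by omega),
        if_neg (show ¬(value / 2 ^ 6 % 16 - value / 2 ^ 6 % 8 ≠ 0) from by omega),
        if_neg (show ¬(value / 2 ^ 5 % 16 - value / 2 ^ 5 % 8 ≠ 0) from by omega),
        if_neg (show ¬(value / 2 ^ 4 % 16 - value / 2 ^ 4 % 8 ≠ 0) from by omega),
        if_neg (show ¬(value / 2 ^ 3 % 16 - value / 2 ^ 3 % 8 ≠ 0) from by omega),
        if_pos (show value / 2 ^ 2 % 16 - value / 2 ^ 2 % 8 ≠ 0 from by omega)]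
      norm_num
    · subst h
      norm_num at hL1 hL2
      rw [if_neg (show ¬(value / 2 ^ 15 % 16 - value / 2 ^ 15 % 8 ≠ 0) from by omega),
        if_neg (show ¬(value / 2 ^ 14 % 16 - value / 2 ^ 14 % 8 ≠ 0) from by omega),
        if_neg (show ¬(value / 2 ^ 13 % 16 - value / 2 ^ 13 % 8 ≠ 0) from by omega),
        if_neg (show ¬(value / 2 ^ 12 % 16 - value / 2 ^ 12 % 8 ≠ 0) from by omega),
        if_neg (show ¬(value / 2 ^ 11 % 16 - value / 2 ^ 11 % 8 ≠ 0) from by omega),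
        if_neg (show ¬(value / 2 ^ 10 % 16 - value / 2 ^ 10 % 8 ≠ 0) from by omega),
        if_neg (show ¬(value / 2 ^ 9 % 16 - value / 2 ^ 9 % 8 ≠ 0) from by omega),
        if_neg (show ¬(value / 2 ^ 8 % 16 - value / 2 ^ 8 % 8 ≠ 0) from by omega),
        if_neg (show ¬(value / 2 ^ 7 % 16 - value / 2 ^ 7 % 8 ≠ 0) from by omega),
        if_neg (show ¬(value / 2 ^ 6 % 16 - value / 2 ^ 6 % 8 ≠ 0) from by omega),
        if_neg (show ¬(value / 2 ^ 5 % 16 - value / 2 ^ 5 % 8 ≠ 0) from by omega),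
        if_neg (show ¬(value / 2 ^ 4 % 16 - value / 2 ^ 4 % 8 ≠ 0) from by omega),
        if_pos (show value / 2 ^ 3 % 16 - value / 2 ^ 3 % 8 ≠ 0 from by omega)]
      norm_num
    · subst h
      norm_num at hL1 hL2
      rw [if_neg (show ¬(value / 2 ^ 15 % 16 - value / 2 ^ 15 % 8 ≠ 0) from by omega),
        if_neg (show ¬(value / 2 ^ 14 % 16 - value / 2 ^ 14 % 8 ≠ 0) from by omega),
        if_neg (show ¬(value / 2 ^ 13 % 16 - value / 2 ^ 13 % 8 ≠ 0) from by omega),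
        if_neg (show ¬(value / 2 ^ 12 % 16 - value / 2 ^ 12 % 8 ≠ 0) from by omega),
        if_neg (show ¬(value / 2 ^ 11 % 16 - value / 2 ^ 11 % 8 ≠ 0) from by omega),
        if_neg (show ¬(value / 2 ^ 10 % 16 - value / 2 ^ 10 % 8 ≠ 0) from by omega),
        if_neg (show ¬(value / 2 ^ 9 % 16 - value / 2 ^ 9 % 8 ≠ 0) from by omega),
        if_neg (show ¬(value / 2 ^ 8 % 16 - value / 2 ^ 8 % 8 ≠ 0) from by omega),
        if_neg (show ¬(value / 2 ^ 7 % 16 - value / 2 ^ 7 % 8 ≠ 0) from by omega),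
        if_neg (show ¬(value / 2 ^ 6 % 16 - value / 2 ^ 6 % 8 ≠ 0) from by omega),
        if_neg (show ¬(value / 2 ^ 5 % 16 - value / 2 ^ 5 % 8 ≠ 0) from by omega),
        if_pos (show value / 2 ^ 4 % 16 - value / 2 ^ 4 % 8 ≠ 0 from by omega)]
      norm_num
    · subst h
      norm_num at hL1 hL2
      rw [if_neg (show ¬(value / 2 ^ 15 % 16 - value / 2 ^ 15 % 8 ≠ 0) from by omega),
        if_neg (show ¬(value / 2 ^ 14 % 16 - value / 2 ^ 14 % 8 ≠ 0) from by omega),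
        if_neg (show ¬(value / 2 ^ 13 % 16 - value / 2 ^ 13 % 8 ≠ 0) from by omega),
        if_neg (show ¬(value / 2 ^ 12 % 16 - value / 2 ^ 12 % 8 ≠ 0) from by omega),
        if_neg (show ¬(value / 2 ^ 11 % 16 - value / 2 ^ 11 % 8 ≠ 0) from by omega),
        if_neg (show ¬(value / 2 ^ 10 % 16 - value / 2 ^ 10 % 8 ≠ 0) from by omega),
        if_neg (show ¬(value / 2 ^ 9 % 16 - value / 2 ^ 9 % 8 ≠ 0) from by omega),
        if_neg (show ¬(value / 2 ^ 8 % 16 - value / 2 ^ 8 % 8 ≠ 0) from by omega),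
        if_neg (show ¬(value / 2 ^ 7 % 16 - value / 2 ^ 7 % 8 ≠ 0) from by omega),
        if_neg (show ¬(value / 2 ^ 6 % 16 - value / 2 ^ 6 % 8 ≠ 0) from by omega),
        if_pos (show value / 2 ^ 5 % 16 - value / 2 ^ 5 % 8 ≠ 0 from by omega)]
      norm_num
    · subst h
      norm_num at hL1 hL2
      rw [if_neg (show ¬(value / 2 ^ 15 % 16 - value / 2 ^ 15 % 8 ≠ 0) from by omega),
        if_neg (show ¬(value / 2 ^ 14 % 16 - value / 2 ^ 14 % 8 ≠ 0) from by omega),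
        if_neg (show ¬(value / 2 ^ 13 % 16 - value / 2 ^ 13 % 8 ≠ 0) from by omega),
        if_neg (show ¬(value / 2 ^ 12 % 16 - value / 2 ^ 12 % 8 ≠ 0) from by omega),
        if_neg (show ¬(value / 2 ^ 11 % 16 - value / 2 ^ 11 % 8 ≠ 0) from by omega),
        if_neg (show ¬(value / 2 ^ 10 % 16 - value / 2 ^ 10 % 8 ≠ 0) from by omega),
        if_neg (show ¬(value / 2 ^ 9 % 16 - value / 2 ^ 9 % 8 ≠ 0) from by omega),
        if_neg (show ¬(value / 2 ^ 8 % 16 - value / 2 ^ 8 % 8 ≠ 0) from by omega),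
        if_neg (show ¬(value / 2 ^ 7 % 16 - value / 2 ^ 7 % 8 ≠ 0) from by omega),
        if_pos (show value / 2 ^ 6 % 16 - value / 2 ^ 6 % 8 ≠ 0 from by omega)]
      norm_num
    · subst h
      norm_num at hL1 hL2
      rw [if_neg (show ¬(value / 2 ^ 15 % 16 - value / 2 ^ 15 % 8 ≠ 0) from by omega),
        if_neg (show ¬(value / 2 ^ 14 % 16 - value / 2 ^ 14 % 8 ≠ 0) from by omega),
        if_neg (show ¬(value / 2 ^ 13 % 16 - value / 2 ^ 13 % 8 ≠ 0) from by omega),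
        if_neg (show ¬(value / 2 ^ 12 % 16 - value / 2 ^ 12 % 8 ≠ 0) from by omega),
        if_neg (show ¬(value / 2 ^ 11 % 16 - value / 2 ^ 11 % 8 ≠ 0) from by omega),
        if_neg (show ¬(value / 2 ^ 10 % 16 - value / 2 ^ 10 % 8 ≠ 0) from by omega),
        if_neg (show ¬(value / 2 ^ 9 % 16 - value / 2 ^ 9 % 8 ≠ 0) from by omega),
        if_neg (show ¬(value / 2 ^ 8 % 16 - value / 2 ^ 8 % 8 ≠ 0) from by omega),
        if_pos (show value / 2 ^ 7 % 16 - value / 2 ^ 7 % 8 ≠ 0 from by omega)]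
      norm_num
    · subst h
      norm_num at hL1 hL2
      rw [if_neg (show ¬(value / 2 ^ 15 % 16 - value / 2 ^ 15 % 8 ≠ 0) from by omega),
        if_neg (show ¬(value / 2 ^ 14 % 16 - value / 2 ^ 14 % 8 ≠ 0) from by omega),
        if_neg (show ¬(value / 2 ^ 13 % 16 - value / 2 ^ 13 % 8 ≠ 0) from by omega),
        if_neg (show ¬(value / 2 ^ 12 % 16 - value / 2 ^ 12 % 8 ≠ 0) from by omega),
        if_neg (show ¬(value / 2 ^ 11 % 16 - value / 2 ^ 11 % 8 ≠ 0) from by omega),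
        if_neg (show ¬(value / 2 ^ 10 % 16 - value / 2 ^ 10 % 8 ≠ 0) from by omega),
        if_neg (show ¬(value / 2 ^ 9 % 16 - value / 2 ^ 9 % 8 ≠ 0) from by omega),
        if_pos (show value / 2 ^ 8 % 16 - value / 2 ^ 8 % 8 ≠ 0 from by omega)]
      norm_num
    · subst h
      norm_num at hL1 hL2
      rw [if_neg (show ¬(value / 2 ^ 15 % 16 - value / 2 ^ 15 % 8 ≠ 0) from by omega),
        if_neg (show ¬(value / 2 ^ 14 % 16 - value / 2 ^ 14 % 8 ≠ 0) from by omega),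
        if_neg (show ¬(value / 2 ^ 13 % 16 - value / 2 ^ 13 % 8 ≠ 0) from by omega),
        if_neg (show ¬(value / 2 ^ 12 % 16 - value / 2 ^ 12 % 8 ≠ 0) from by omega),
        if_neg (show ¬(value / 2 ^ 11 % 16 - value / 2 ^ 11 % 8 ≠ 0) from by omega),
        if_neg (show ¬(value / 2 ^ 10 % 16 - value / 2 ^ 10 % 8 ≠ 0) from by omega),
        if_pos (show value / 2 ^ 9 % 16 - value / 2 ^ 9 % 8 ≠ 0 from by omega)]
      norm_num
    · subst h
      norm_num at hL1 hL2
      rw [if_neg (show ¬(value / 2 ^ 15 % 16 - value / 2 ^ 15 % 8 ≠ 0) from by omega),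
        if_neg (show ¬(value / 2 ^ 14 % 16 - value / 2 ^ 14 % 8 ≠ 0) from by omega),
        if_neg (show ¬(value / 2 ^ 13 % 16 - value / 2 ^ 13 % 8 ≠ 0) from by omega),
        if_neg (show ¬(value / 2 ^ 12 % 16 - value / 2 ^ 12 % 8 ≠ 0) from by omega),
        if_neg (show ¬(value / 2 ^ 11 % 16 - value / 2 ^ 11 % 8 ≠ 0) from by omega),
        if_pos (show value / 2 ^ 10 % 16 - value / 2 ^ 10 % 8 ≠ 0 from by omega)]
      norm_num
    · subst h
      norm_num at hL1 hL2
      rw [if_neg (show ¬(value / 2 ^ 15 % 16 - value / 2 ^ 15 % 8 ≠ 0) from by omega),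
        if_neg (show ¬(value / 2 ^ 14 % 16 - value / 2 ^ 14 % 8 ≠ 0) from by omega),
        if_neg (show ¬(value / 2 ^ 13 % 16 - value / 2 ^ 13 % 8 ≠ 0) from by omega),
        if_neg (show ¬(value / 2 ^ 12 % 16 - value / 2 ^ 12 % 8 ≠ 0) from by omega),
        if_pos (show value / 2 ^ 11 % 16 - value / 2 ^ 11 % 8 ≠ 0 from by omega)]
      norm_num
    · subst h
      norm_num at hL1 hL2
      rw [if_neg (show ¬(value / 2 ^ 15 % 16 - value / 2 ^ 15 % 8 ≠ 0) from by omega),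
        if_neg (show ¬(value / 2 ^ 14 % 16 - value / 2 ^ 14 % 8 ≠ 0) from by omega),
        if_neg (show ¬(value / 2 ^ 13 % 16 - value / 2 ^ 13 % 8 ≠ 0) from by omega),
        if_pos (show value / 2 ^ 12 % 16 - value / 2 ^ 12 % 8 ≠ 0 from by omega)]
      norm_num
    · subst h
      norm_num at hL1 hL2
      rw [if_neg (show ¬(value / 2 ^ 15 % 16 - value / 2 ^ 15 % 8 ≠ 0) from by omega),
        if_neg (show ¬(value / 2 ^ 14 % 16 - value / 2 ^ 14 % 8 ≠ 0) from by omega),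
        if_pos (show value / 2 ^ 13 % 16 - value / 2 ^ 13 % 8 ≠ 0 from by omega)]
      norm_num
    · subst h
      norm_num at hL1 hL2
      rw [if_neg (show ¬(value / 2 ^ 15 % 16 - value / 2 ^ 15 % 8 ≠ 0) from by omega),
        if_pos (show value / 2 ^ 14 % 16 - value / 2 ^ 14 % 8 ≠ 0 from by omega)]
      norm_num
    · subst h
      norm_num at hL1 hL2
      rw [if_pos (show value / 2 ^ 15 % 16 - value / 2 ^ 15 % 8 ≠ 0 from by omega)]
      norm_num

-- ===== VERDICT (by name: the statement is the Claim_ definition above) =====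
theorem ufloat8_enc_spec : Claim_equal_ufloat8_enc := fun value _ => mainEq value
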